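-- pv_equiv track=rewrite | github.com/eddiemachado/8alls | api/app/routes/daily_notes.py | _assemble_content
-- ===== SOURCE A (Python) =====
-- def _assemble_content(sections: dict) -> str:
--     """Assemble sections dict into a full markdown string."""
--     section_order = ["tasks", "calendar", "notes", "completed"]
--     section_labels = {
--         "tasks": "## Tasks",
--         "calendar": "## Calendar",
--         "notes": "## Notes",
--         "completed": "## Completed",
--     }
--     parts = []
--     # Render known sections in preferred order first
--     for key in section_order:
--         if key in sections and sections[key]:
--             parts.append(f"{section_labels.get(key, f'## {key.title()}')}\n{sections[key]}")
--     # Then any custom sections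
--     for key, value in sections.items():
--         if key not in section_order and value:
--             parts.append(f"## {key.title()}\n{value}")
--     return "\n\n".join(parts)
-- ===== SOURCE B (Python) =====
-- def _assemble_content(sections: dict) -> str:
--     """Assemble sections dict into a full markdown string.
--
--     Single pass: each truthy section is rendered once and dropped into one of
--     five rank buckets (four known sections + customs); the buckets are then
--     flattened and joined, so no membership scans or second pass are needed.
--     """
--     section_order = ["tasks", "calendar", "notes", "completed"]
--     rank = {k: i for i, k in enumerate(section_order)}
--     buckets = [[], [], [], [], []]
--     for key, value in sections.items():
--         if value:
--             buckets[rank.get(key, len(section_order))].append(f"## {key.title()}\n{value}")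
--     return "\n\n".join(p for b in buckets for p in b)
-- ===== Notes on version B (the rewrite author's own statement) =====
-- stated objective: alternative
-- what changed: Replaces A's two phases (four dict membership/lookup probes in preferred order, then a second full pass for customs) and its redundant label table by one single pass over the items that drops each truthy rendered section into a rank bucket (rank map built once from the order list), then flattens the buckets; labels come uniformly from '## ' + key.title().
import Mathlib
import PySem

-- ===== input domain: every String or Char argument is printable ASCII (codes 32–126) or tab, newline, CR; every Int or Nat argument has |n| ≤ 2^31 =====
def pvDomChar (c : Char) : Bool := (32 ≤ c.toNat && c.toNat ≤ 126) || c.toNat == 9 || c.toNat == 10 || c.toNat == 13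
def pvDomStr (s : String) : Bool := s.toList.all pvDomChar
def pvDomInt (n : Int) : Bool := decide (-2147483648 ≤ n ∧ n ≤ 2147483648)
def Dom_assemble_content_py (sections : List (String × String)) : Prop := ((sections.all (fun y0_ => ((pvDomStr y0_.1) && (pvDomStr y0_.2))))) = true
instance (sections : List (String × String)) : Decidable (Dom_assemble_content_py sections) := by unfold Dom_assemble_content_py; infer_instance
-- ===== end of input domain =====

-- B replaces A's two phases (four ordered dict probes, then a second full pass for customs)
-- by one single pass that drops each truthy rendered section into a rank bucket; same cost, different decomposition.

-- ===== PORT A =====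
-- str.title(), hand-ported (exact on the ASCII domain: a char after an alphabetic char is
-- lowercased, otherwise uppercased); used by both ports since both Pythons call .title().
def pyTitleGo : List Char → Bool → List Char
  | [], _ => []
  | c :: cs, prev =>
    if c.isAlpha then (if prev then c.toLower else c.toUpper) :: pyTitleGo cs true
    else c :: pyTitleGo cs false

def pyTitle (s : String) : String := String.ofList (pyTitleGo s.toList false)

def assemble_content_py (sections : List (String × String)) : String :=
  let d : PySem.Dict String String := PySem.Dict.mk sections
  let section_order : List String := ["tasks", "calendar", "notes", "completed"]
  let section_labels : PySem.Dict String String :=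
    PySem.Dict.mk [("tasks", "## Tasks"), ("calendar", "## Calendar"),
                   ("notes", "## Notes"), ("completed", "## Completed")]
  -- Render known sections in preferred order first
  let parts := section_order.foldl (fun parts key =>
    if d.contains key && (d.getD key "" != "") then
      parts ++ [section_labels.getD key ("## " ++ pyTitle key) ++ "\n" ++ d.getD key ""]
    else parts) []
  -- Then any custom sections
  let parts := d.items.foldl (fun parts kv =>
    if !section_order.contains kv.1 && (kv.2 != "") then
      parts ++ ["## " ++ pyTitle kv.1 ++ "\n" ++ kv.2]
    else parts) parts
  PySem.Str.join "\n\n" parts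

-- ===== PORT B =====
def assemble_content_py_alt (sections : List (String × String)) : String :=
  let section_order : List String := ["tasks", "calendar", "notes", "completed"]
  let rank : PySem.Dict String Int :=
    PySem.Dict.ofList ((PySem.List.enumerate section_order).map (fun p => (p.2, p.1)))
  let buckets : List (List String) := sections.foldl (fun bs kv =>
    if kv.2 != "" then
      -- rank values are 0..4, so .toNat is exact and the index is always in range
      let i := (rank.getD kv.1 (Int.ofNat section_order.length)).toNat
      bs.set i ((bs.getD i []) ++ ["## " ++ pyTitle kv.1 ++ "\n" ++ kv.2])
    else bs) [[], [], [], [], []]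
  PySem.Str.join "\n\n" buckets.flatten

-- ===== PRECONDITION & SPEC =====
-- Pre_ excludes association lists with duplicate keys: they do not represent a Python dict
-- (duplicates collapse on dict construction, so A never sees them and their reading is accidental).
def Pre_assemble_content_py (sections : List (String × String)) : Prop :=
  (sections.map Prod.fst).Nodup
instance (sections : List (String × String)) : Decidable (Pre_assemble_content_py sections) := by
  unfold Pre_assemble_content_py; infer_instance

def pvWitness_assemble_content_py : (List (String × String)) :=
  [("tasks", "- a"), ("misc", "x"), ("notes", "")]

def Spec_assemble_content_py (sections : List (String × String)) (out : String) : Prop :=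
  out = assemble_content_py_alt sections
instance (sections : List (String × String)) (out : String) :
    Decidable (Spec_assemble_content_py sections out) := by
  unfold Spec_assemble_content_py; infer_instance

-- ===== CLAIM (what is proved, stated in full; the proofs are below) =====
def Claim_equal_assemble_content_py : Prop :=
  ∀ (sections : List (String × String)), Dom_assemble_content_py sections →
    Pre_assemble_content_py sections →
    Spec_assemble_content_py sections (assemble_content_py sections)


-- ===== LEMMAS AND PROOFS =====

-- rendered section, the shared shape of the entries both programs emit
def pvEntry (kv : String × String) : String := "## " ++ pyTitle kv.1 ++ "\n" ++ kv.2

-- closed form of B's rank.get(key, 4)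
def pvRk (k : String) : Int :=
  if k = "tasks" then 0 else if k = "calendar" then 1 else if k = "notes" then 2
  else if k = "completed" then 3 else 4

-- the bucket of rank i, as a filter
def pvPart (i : Int) (l : List (String × String)) : List String :=
  (l.filter (fun kv => kv.2 != "" && pvRk kv.1 == i)).map pvEntry

-- B's loop body, with the rank lookup replaced by its closed form
def pvStep (bs : List (List String)) (kv : String × String) : List (List String) :=
  if kv.2 != "" then
    bs.set (pvRk kv.1).toNat (bs.getD (pvRk kv.1).toNat [] ++ [pvEntry kv])
  else bs

theorem pvRank_getD (k : String) :
    (PySem.Dict.ofList ((PySem.List.enumerate ["tasks", "calendar", "notes", "completed"]).map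
      (fun p => (p.2, p.1)))).getD k (Int.ofNat 4) = pvRk k := by
  have h : (PySem.Dict.ofList ((PySem.List.enumerate ["tasks", "calendar", "notes", "completed"]).map
      (fun p => (p.2, p.1)))) = PySem.Dict.mk [("tasks", 0), ("calendar", 1), ("notes", 2), ("completed", 3)] := by decide
  rw [h]
  by_cases h1 : k = "tasks"
  · subst h1; decide
  by_cases h2 : k = "calendar"
  · subst h2; decide
  by_cases h3 : k = "notes"
  · subst h3; decide
  by_cases h4 : k = "completed"
  · subst h4; decide
  · have g1 : ¬("tasks" = k) := fun h => h1 h.symm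
    have g2 : ¬("calendar" = k) := fun h => h2 h.symm
    have g3 : ¬("notes" = k) := fun h => h3 h.symm
    have g4 : ¬("completed" = k) := fun h => h4 h.symm
    simp [PySem.Dict.getD, PySem.Dict.get?, pvRk, h1, h2, h3, h4, g1, g2, g3, g4]

theorem pv_buckets_spec (l : List (String × String)) (b0 b1 b2 b3 b4 : List String) :
    l.foldl pvStep [b0, b1, b2, b3, b4]
    = [b0 ++ pvPart 0 l, b1 ++ pvPart 1 l, b2 ++ pvPart 2 l, b3 ++ pvPart 3 l, b4 ++ pvPart 4 l] := by
  induction l generalizing b0 b1 b2 b3 b4 with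
  | nil => simp [pvPart]
  | cons kv tl ih =>
    simp only [List.foldl_cons]
    by_cases hv : kv.2 = ""
    · rw [show pvStep [b0, b1, b2, b3, b4] kv = [b0, b1, b2, b3, b4] from by simp [pvStep, hv]]
      rw [ih]
      simp [pvPart, hv]
    · by_cases k1 : kv.1 = "tasks"
      · rw [show pvStep [b0, b1, b2, b3, b4] kv = [b0 ++ [pvEntry kv], b1, b2, b3, b4] from by
          simp [pvStep, hv, k1, pvRk]]
        rw [ih]
        simp [pvPart, hv, k1, pvRk]
      by_cases k2 : kv.1 = "calendar"
      · rw [show pvStep [b0, b1, b2, b3, b4] kv = [b0, b1 ++ [pvEntry kv], b2, b3, b4] from by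
          simp [pvStep, hv, k2, pvRk]]
        rw [ih]
        simp [pvPart, hv, k1, k2, pvRk]
      by_cases k3 : kv.1 = "notes"
      · rw [show pvStep [b0, b1, b2, b3, b4] kv = [b0, b1, b2 ++ [pvEntry kv], b3, b4] from by
          simp [pvStep, hv, k1, k2, k3, pvRk]]
        rw [ih]
        simp [pvPart, hv, k1, k2, k3, pvRk]
      by_cases k4 : kv.1 = "completed"
      · rw [show pvStep [b0, b1, b2, b3, b4] kv = [b0, b1, b2, b3 ++ [pvEntry kv], b4] from by
          simp [pvStep, hv, k1, k2, k3, k4, pvRk]]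
        rw [ih]
        simp [pvPart, hv, k1, k2, k3, k4, pvRk]
      · rw [show pvStep [b0, b1, b2, b3, b4] kv = [b0, b1, b2, b3, b4 ++ [pvEntry kv]] from by
          simp [pvStep, hv, k1, k2, k3, k4, pvRk]]
        rw [ih]
        simp [pvPart, hv, k1, k2, k3, k4, pvRk]

theorem pv_filter_key (l : List (String × String)) (hnd : (l.map Prod.fst).Nodup) (k : String) :
    l.filter (fun kv => kv.2 != "" && kv.1 == k)
    = (match (PySem.Dict.mk l).get? k with
       | some v => if v != "" then [(k, v)] else []
       | none => []) := by
  induction l with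
  | nil => simp [PySem.Dict.get?]
  | cons kv tl ih =>
    simp only [List.map_cons, List.nodup_cons] at hnd
    obtain ⟨hnotin, hnd'⟩ := hnd
    rw [PySem.Dict.get?_mk_cons]
    by_cases hk : kv.1 = k
    · have hfil : tl.filter (fun kv => kv.2 != "" && kv.1 == k) = [] := by
        rw [List.filter_eq_nil_iff]
        intro p hp hcond
        apply hnotin
        have : p.1 = k := by simpa using (Bool.and_elim_right hcond)
        rw [← hk] at this
        exact this ▸ List.mem_map_of_mem hp
      subst hk
      by_cases hv : kv.2 = ""
      · simp [hv, hfil]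
      · simp [hv, hfil]
    · have : (kv.1 == k) = false := by simpa using hk
      simp [List.filter_cons, this, ih hnd']

-- (filter; map) as a flatMap of optional singletons, to split A's first loop per key
theorem pv_filter_map_flatMap {α β : Type} (p : α → Bool) (f : α → β) (l : List α) :
    (l.filter p).map f = l.flatMap (fun x => if p x then [f x] else []) := by
  induction l with
  | nil => simp
  | cons x tl ih => by_cases hx : p x <;> simp [List.filter_cons, hx, ih]

-- A's probe for one known key equals B's bucket of that key's rank
theorem pv_known (l : List (String × String)) (hnd : (l.map Prod.fst).Nodup) (k : String)
    (lab : String) (hlab : lab = "## " ++ pyTitle k)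
    (hinj : ∀ s, (pvRk s == pvRk k) = (s == k)) :
    (if (PySem.Dict.mk l).contains k && ((PySem.Dict.mk l).getD k "" != "") then
       [lab ++ "\n" ++ (PySem.Dict.mk l).getD k ""] else [])
    = pvPart (pvRk k) l := by
  have hfil : l.filter (fun kv => kv.2 != "" && pvRk kv.1 == pvRk k)
      = l.filter (fun kv => kv.2 != "" && kv.1 == k) := by
    apply List.filter_congr
    intro kv _
    rw [hinj kv.1]
  rw [pvPart, hfil, pv_filter_key l hnd k]
  rw [PySem.Dict.contains_eq_isSome_get?]
  cases hg : (PySem.Dict.mk l).get? k with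
  | none => simp [PySem.Dict.getD, hg]
  | some v =>
    by_cases hv : v = "" <;>
      simp [PySem.Dict.getD, hg, hv, pvEntry, hlab]

-- on the four known keys, matching B's rank is matching the key itself
theorem pv_inj_of_known (k : String)
    (hk : k ∈ (["tasks", "calendar", "notes", "completed"] : List String)) (s : String) :
    (pvRk s == pvRk k) = (s == k) := by
  fin_cases hk <;>
  · by_cases h1 : s = "tasks" <;> by_cases h2 : s = "calendar" <;>
      by_cases h3 : s = "notes" <;> by_cases h4 : s = "completed" <;>
      simp_all [pvRk]

-- A's custom-section test equals "rank 4"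
theorem pv_custom_pred (kv : String × String) :
    (!(["tasks", "calendar", "notes", "completed"].contains kv.1) && (kv.2 != ""))
    = (kv.2 != "" && pvRk kv.1 == (4 : Int)) := by
  by_cases k1 : kv.1 = "tasks"
  · simp [k1, pvRk]
  by_cases k2 : kv.1 = "calendar"
  · simp [k2, pvRk]
  by_cases k3 : kv.1 = "notes"
  · simp [k3, pvRk]
  by_cases k4 : kv.1 = "completed"
  · simp [k4, pvRk]
  · simp [k1, k2, k3, k4, pvRk, Bool.and_comm]

-- ===== VERDICT (by name: the statement is the Claim_ definition above) =====
theorem assemble_content_py_spec : Claim_equal_assemble_content_py := by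
  intro sections _ hpre
  unfold Spec_assemble_content_py assemble_content_py assemble_content_py_alt
  simp only []
  -- B side: the loop body is pvStep
  have hstep : (fun (bs : List (List String)) (kv : String × String) =>
      if kv.2 != "" then
        let i := ((PySem.Dict.ofList ((PySem.List.enumerate ["tasks", "calendar", "notes", "completed"]).map
          (fun p => (p.2, p.1)))).getD kv.1 (Int.ofNat (List.length ["tasks", "calendar", "notes", "completed"]))).toNat
        bs.set i ((bs.getD i []) ++ ["## " ++ pyTitle kv.1 ++ "\n" ++ kv.2])
      else bs) = pvStep := by
    funext bs kv
    show _ = pvStep bs kv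
    rw [pvStep]
    simp only [List.length_cons, List.length_nil]
    rw [pvRank_getD]
    rfl
  rw [hstep, pv_buckets_spec]
  -- A side: both loops are append-if folds
  rw [PySem.List.foldl_append_if
        (fun key => (PySem.Dict.mk sections).contains key && ((PySem.Dict.mk sections).getD key "" != ""))
        (fun key => (PySem.Dict.mk [("tasks", "## Tasks"), ("calendar", "## Calendar"),
                   ("notes", "## Notes"), ("completed", "## Completed")]).getD key ("## " ++ pyTitle key)
                    ++ "\n" ++ (PySem.Dict.mk sections).getD key "")]
  rw [PySem.List.foldl_append_if
        (fun kv : String × String => !(["tasks", "calendar", "notes", "completed"].contains kv.1) && (kv.2 != ""))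
        (fun kv : String × String => "## " ++ pyTitle kv.1 ++ "\n" ++ kv.2)]
  rw [pv_filter_map_flatMap]
  -- custom part
  have hcustom : (sections.filter
      (fun kv : String × String => !(["tasks", "calendar", "notes", "completed"].contains kv.1) && (kv.2 != ""))).map
      (fun kv : String × String => "## " ++ pyTitle kv.1 ++ "\n" ++ kv.2) = pvPart 4 sections := by
    rw [pvPart]
    congr 1
    apply List.filter_congr
    intro kv _
    exact pv_custom_pred kv
  rw [hcustom]
  simp only [List.flatMap_cons, List.flatMap_nil, List.append_nil]
  rw [pv_known sections hpre "tasks" _ (by decide) (pv_inj_of_known "tasks" (by decide)),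
      pv_known sections hpre "calendar" _ (by decide) (pv_inj_of_known "calendar" (by decide)),
      pv_known sections hpre "notes" _ (by decide) (pv_inj_of_known "notes" (by decide)),
      pv_known sections hpre "completed" _ (by decide) (pv_inj_of_known "completed" (by decide))]
  simp only [show pvRk "tasks" = 0 from by decide, show pvRk "calendar" = 1 from by decide,
    show pvRk "notes" = 2 from by decide, show pvRk "completed" = 3 from by decide]
  simp [List.append_assoc]
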